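-- pv_equiv track=rewrite | github.com/wx83/TeaserGen_Official | teasergen_lr/prepare_dataset.py | label_frames
-- ===== SOURCE A (Python) =====
-- import bisect
--
-- def label_frames(scene_starts):
--     # Assume the last element in scene_starts is the total number of frames
--     total_frames = scene_starts[-1]
--     scene_starts = scene_starts[:-1]  # Remove the last element as it's not a scene start, it just indicates the total number of frames
--
--     # Initialize the list to store the scene labels for each frame
--     scene_labels = []
--     total_frames = int(total_frames)
--     # Loop through all frames from 0 to total_frames - 1
--     for frame_index in range(total_frames):
--         # Use bisect to find the right scene by finding where the frame would fit in the scene_starts list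
--         # minus 1 because bisect gives the position this element would be inserted to achieve a sorted list
--         # and we need the index of the previous element as it denotes the scene change
--         scene_index = bisect.bisect_right(scene_starts, frame_index) - 1
--         scene_labels.append(scene_index)
--
--     return scene_labels
-- ===== SOURCE B (Python) =====
-- def label_frames(scene_starts):
--     total_frames = int(scene_starts[-1])
--     starts = scene_starts[:-1]
--     res = []
--
--     # Batched binary search: instead of bisecting once per frame, recurse on the
--     # scene list once, splitting the (sorted, contiguous) frame range [xlo, xhi)
--     # at each pivot so every scene entry is examined O(1) times overall.
--     def fill(lo, hi, xlo, xhi):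
--         if xlo >= xhi:
--             return
--         if lo >= hi:
--             res.extend([lo - 1] * (xhi - xlo))
--             return
--         mid = (lo + hi) // 2
--         pivot = starts[mid]
--         split = min(max(pivot, xlo), xhi)
--         fill(lo, mid, xlo, split)
--         fill(mid + 1, hi, split, xhi)
--
--     fill(0, len(starts), 0, max(total_frames, 0))
--     return res
-- ===== Notes on version B (the rewrite author's own statement) =====
-- stated objective: faster
-- what changed: Replaces the per-frame binary search (bisect_right once for every frame) by a single batched recursion over the scene list that partitions the sorted contiguous frame range [0,total) at each pivot and fills whole label ranges with extend, visiting each scene entry O(1) times.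
import Mathlib
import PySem

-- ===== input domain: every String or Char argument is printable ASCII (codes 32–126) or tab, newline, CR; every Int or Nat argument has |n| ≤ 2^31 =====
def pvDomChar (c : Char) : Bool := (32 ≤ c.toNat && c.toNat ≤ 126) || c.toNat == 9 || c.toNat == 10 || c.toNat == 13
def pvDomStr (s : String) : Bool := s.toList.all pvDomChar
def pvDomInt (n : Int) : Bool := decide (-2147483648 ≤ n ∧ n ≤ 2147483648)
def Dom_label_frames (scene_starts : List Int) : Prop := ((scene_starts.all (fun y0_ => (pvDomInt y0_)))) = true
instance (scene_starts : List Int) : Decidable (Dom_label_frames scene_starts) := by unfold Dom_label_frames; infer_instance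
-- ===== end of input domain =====

-- B replaces A's per-frame bisect_right by one batched recursion over the scene list
-- that splits the contiguous frame range at each pivot (objective: faster, O(F+S) vs O(F log S)).


-- ===== PORT A =====
-- bisect.bisect_right(a, x) with lo/hi bounds: the CPython loop
-- 'while lo < hi: mid = (lo+hi)//2; if x < a[mid]: hi = mid else: lo = mid+1'
def bisectRight (a : List Int) (x : Int) (lo hi : Nat) : Nat :=
  if h : lo < hi then
    if x < a.getD ((lo + hi) / 2) 0 then bisectRight a x lo ((lo + hi) / 2)
    else bisectRight a x (((lo + hi) / 2) + 1) hi
  else lo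
termination_by hi - lo
decreasing_by all_goals omega

def label_frames (scene_starts : List Int) : List Int :=
  match PySem.List.pyGet? scene_starts (-1) with
  | none => []    -- Python raises IndexError here; excluded by Pre_label_frames
  | some total_frames =>
    let starts := PySem.List.slice scene_starts none (some (-1))  -- scene_starts[:-1]
    (PySem.List.pyRange 0 total_frames 1).foldl
      (fun acc frame_index =>
        acc ++ [((bisectRight starts frame_index 0 starts.length : Int) - 1)]) []

-- ===== PORT B =====
-- fill(lo, hi, xlo, xhi): labels, in order, for frames xlo..xhi-1 whose bisect
-- search is confined to the index interval [lo, hi).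
def fillB (starts : List Int) (lo hi : Nat) (xlo xhi : Int) : List Int :=
  if xhi ≤ xlo then []
  else if h : lo < hi then
    fillB starts lo ((lo + hi) / 2) xlo
        (min (max (starts.getD ((lo + hi) / 2) 0) xlo) xhi) ++
    fillB starts (((lo + hi) / 2) + 1) hi
        (min (max (starts.getD ((lo + hi) / 2) 0) xlo) xhi) xhi
  else List.replicate (xhi - xlo).toNat ((lo : Int) - 1)
termination_by hi - lo
decreasing_by all_goals omega

def label_frames_alt (scene_starts : List Int) : List Int :=
  match PySem.List.pyGet? scene_starts (-1) with
  | none => []    -- Python raises IndexError here; excluded by Pre_label_frames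
  | some total_frames =>
    let starts := PySem.List.slice scene_starts none (some (-1))
    fillB starts 0 starts.length 0 (max total_frames 0)

-- ===== PRECONDITION & SPEC =====
-- A raises IndexError on the empty list (scene_starts[-1]); excluded.
def Pre_label_frames (scene_starts : List Int) : Prop := scene_starts ≠ []
instance (scene_starts : List Int) : Decidable (Pre_label_frames scene_starts) := by unfold Pre_label_frames; infer_instance
def pvWitness_label_frames : List Int := [0, 2, 4]
def Spec_label_frames (scene_starts : List Int) (out : List Int) : Prop := out = label_frames_alt scene_starts
instance (scene_starts : List Int) (out : List Int) : Decidable (Spec_label_frames scene_starts out) := by unfold Spec_label_frames; infer_instance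

-- ===== CLAIM (what is proved, stated in full; the proofs are below) =====
def Claim_equal_label_frames : Prop := ∀ (scene_starts : List Int), Dom_label_frames scene_starts → Pre_label_frames scene_starts → Spec_label_frames scene_starts (label_frames scene_starts)

-- ===== LEMMAS AND PROOFS =====

-- Batching is exact: fillB produces, for each frame in [xlo, xhi) in order, the
-- result of the bisect loop resumed from state (lo, hi), minus one.
theorem fillB_eq_map (starts : List Int) :
    ∀ (fuel lo hi : Nat), hi - lo ≤ fuel → ∀ (xlo xhi : Int),
    fillB starts lo hi xlo xhi =
      (PySem.List.pyRange xlo xhi 1).map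
        (fun x => ((bisectRight starts x lo hi : Int) - 1)) := by
  intro fuel
  induction fuel with
  | zero =>
    intro lo hi hle xlo xhi
    rw [fillB]
    by_cases hx : xhi ≤ xlo
    · simp [hx, PySem.List.pyRange_one_eq_nil hx]
    · have hlh : ¬ lo < hi := by omega
      rw [if_neg hx, dif_neg hlh]
      have : ∀ x ∈ PySem.List.pyRange xlo xhi 1,
          ((bisectRight starts x lo hi : Int) - 1) = ((lo : Int) - 1) := by
        intro x _; rw [bisectRight]; simp [hlh]
      rw [List.map_congr_left this, List.map_const',
        PySem.List.length_pyRange_one]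
  | succ n ih =>
    intro lo hi hle xlo xhi
    rw [fillB]
    by_cases hx : xhi ≤ xlo
    · simp [hx, PySem.List.pyRange_one_eq_nil hx]
    · by_cases hlh : lo < hi
      · rw [if_neg hx, dif_pos hlh]
        have h1 : xlo ≤ min (max (starts.getD ((lo + hi) / 2) 0) xlo) xhi := by omega
        have h2 : min (max (starts.getD ((lo + hi) / 2) 0) xlo) xhi ≤ xhi := by omega
        rw [ih lo ((lo + hi) / 2) (by omega) xlo
              (min (max (starts.getD ((lo + hi) / 2) 0) xlo) xhi),
            ih (((lo + hi) / 2) + 1) hi (by omega)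
              (min (max (starts.getD ((lo + hi) / 2) 0) xlo) xhi) xhi]
        have hL : ∀ x ∈ PySem.List.pyRange xlo
              (min (max (starts.getD ((lo + hi) / 2) 0) xlo) xhi) 1,
            ((bisectRight starts x lo ((lo + hi) / 2) : Int) - 1) =
            ((bisectRight starts x lo hi : Int) - 1) := by
          intro x hxm
          rw [PySem.List.mem_pyRange_one] at hxm
          have hxp : x < starts.getD ((lo + hi) / 2) 0 := by omega
          conv_rhs => rw [bisectRight]
          rw [dif_pos hlh, if_pos hxp]
        have hR : ∀ x ∈ PySem.List.pyRange
              (min (max (starts.getD ((lo + hi) / 2) 0) xlo) xhi) xhi 1,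
            ((bisectRight starts x (((lo + hi) / 2) + 1) hi : Int) - 1) =
            ((bisectRight starts x lo hi : Int) - 1) := by
          intro x hxm
          rw [PySem.List.mem_pyRange_one] at hxm
          have hxp : ¬ x < starts.getD ((lo + hi) / 2) 0 := by omega
          conv_rhs => rw [bisectRight]
          rw [dif_pos hlh, if_neg hxp]
        rw [List.map_congr_left hL, List.map_congr_left hR,
          ← List.map_append,
          ← PySem.List.pyRange_one_append xlo
              (min (max (starts.getD ((lo + hi) / 2) 0) xlo) xhi) xhi h1 h2]
      · rw [if_neg hx, dif_neg hlh]
        have : ∀ x ∈ PySem.List.pyRange xlo xhi 1,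
            ((bisectRight starts x lo hi : Int) - 1) = ((lo : Int) - 1) := by
          intro x _; rw [bisectRight]; simp [hlh]
        rw [List.map_congr_left this, List.map_const',
          PySem.List.length_pyRange_one]

-- ===== VERDICT (by name: the statement is the Claim_ definition above) =====
theorem label_frames_spec : Claim_equal_label_frames := by
  intro scene_starts _ _
  unfold Spec_label_frames label_frames label_frames_alt
  cases hget : PySem.List.pyGet? scene_starts (-1) with
  | none => rfl
  | some total_frames =>
    simp only
    set starts := PySem.List.slice scene_starts none (some (-1)) with hs
    rw [PySem.List.foldl_append_singleton_eq_map,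
      fillB_eq_map starts (starts.length) 0 starts.length (by omega) 0
        (max total_frames 0)]
    by_cases ht : total_frames ≤ 0
    · rw [PySem.List.pyRange_one_eq_nil ht, PySem.List.pyRange_one_eq_nil (by omega)]
      simp
    · have : max total_frames 0 = total_frames := by omega
      rw [this]
      simp
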